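-- pv_equiv track=rewrite | github.com/alceunascimento/cri | pre_cri/11_criar_registro_incorp.py | clean_unit_description
-- ===== SOURCE A (Python) =====
-- def clean_unit_description(text):
--     """
--     Limpa a formatação do texto, removendo quebras de linha desnecessárias
--     e mantendo apenas a estrutura essencial.
--     """
--     # Divide o texto em linhas
--     lines = text.strip().split('\n')
--     cleaned_lines = []
--     current_line = []
--
--     for line in lines:
--         line = line.strip()
--         if not line:  # Linha vazia
--             if current_line:
--                 cleaned_lines.append(' '.join(current_line))
--                 current_line = []
--             cleaned_lines.append('')
--         elif line.startswith('APARTAMENTO') or line.startswith('LOJA') or line.startswith('VAGA'):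
--             # Se já temos uma linha atual, salvamos ela primeiro
--             if current_line:
--                 cleaned_lines.append(' '.join(current_line))
--                 current_line = []
--             cleaned_lines.append(line)
--         else:
--             # Remove caracteres especiais de formatação
--             line = line.replace('|', '').strip()
--             if line:
--                 current_line.append(line)
--
--     # Adiciona a última linha se existir
--     if current_line:
--         cleaned_lines.append(' '.join(current_line))
--
--     # Junta as linhas com a formatação adequada
--     final_text = []
--     for line in cleaned_lines:
--         if line.startswith(('APARTAMENTO', 'LOJA', 'VAGA')):
--             if final_text:  # Adiciona uma linha em branco antes de nova seção
--                 final_text.append('')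
--             final_text.append(line)
--         elif line:  # Linha não vazia que não é cabeçalho
--             final_text.append(line)
--
--     return ' '.join(final_text)
-- ===== SOURCE B (Python) =====
-- def clean_unit_description(text):
--     """
--     Limpa a formatação do texto, removendo quebras de linha desnecessárias
--     e mantendo apenas a estrutura essencial.
--     """
--     parts = []
--     for raw in text.strip().split('\n'):
--         line = raw.strip()
--         if line.startswith(('APARTAMENTO', 'LOJA', 'VAGA')):
--             if parts:
--                 parts.append('')
--             parts.append(line)
--         else:
--             line = line.replace('|', '').strip()
--             if line:
--                 parts.append(line)
--     return ' '.join(parts)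
-- ===== Notes on version B (the rewrite author's own statement) =====
-- stated objective: simpler
-- what changed: A builds an intermediate cleaned_lines list in one pass (grouping consecutive content lines, flushing groups, inserting '' markers) and then reformats it in a second pass; B is a single pass that appends directly to the final parts list with no intermediate list, no group accumulator and no flush step. Pre_ excludes texts containing a non-header line that begins with APARTAMENTO/LOJA/VAGA only after '|' removal: A's second pass re-classifies such a line as a section header and inserts an extra blank separator, while B treats it as ordinary content; …
-- outside the precondition, e.g. on clean_unit_description('X\n\n| APARTAMENTO 1'): A returns 'X  APARTAMENTO 1', B returns 'X APARTAMENTO 1'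
import Mathlib
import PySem

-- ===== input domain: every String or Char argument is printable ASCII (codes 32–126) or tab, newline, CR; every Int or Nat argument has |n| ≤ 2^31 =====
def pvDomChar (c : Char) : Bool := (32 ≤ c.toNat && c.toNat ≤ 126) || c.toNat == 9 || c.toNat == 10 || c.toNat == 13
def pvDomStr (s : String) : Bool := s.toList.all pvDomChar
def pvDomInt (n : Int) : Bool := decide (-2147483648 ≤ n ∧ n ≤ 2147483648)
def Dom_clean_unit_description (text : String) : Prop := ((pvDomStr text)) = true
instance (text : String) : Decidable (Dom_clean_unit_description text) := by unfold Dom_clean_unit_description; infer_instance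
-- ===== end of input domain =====

-- B replaces A's two passes (group-building into an intermediate list, then reformatting)
-- by one direct pass appending to the final parts list; objective: simpler.

-- ===== PORT A =====
-- header test: line.startswith('APARTAMENTO') or line.startswith('LOJA') or line.startswith('VAGA')
def pvHdr (line : String) : Bool :=
  PySem.Str.startswith line "APARTAMENTO" || PySem.Str.startswith line "LOJA" ||
    PySem.Str.startswith line "VAGA"

-- 'if current: cleaned.append(" ".join(current))'
def pvFlush (cur : List String) : List String :=
  if cur = [] then [] else [PySem.Str.join " " cur]

-- first loop body; state = (cleaned_lines, current_line)
def pvStep1 (st : List String × List String) (raw : String) : List String × List String :=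
  let line := PySem.Str.strip raw
  if line = "" then (st.1 ++ pvFlush st.2 ++ [""], [])
  else if pvHdr line then (st.1 ++ pvFlush st.2 ++ [line], [])
  else
    let line2 := PySem.Str.strip (PySem.Str.replace line "|" "")
    if line2 = "" then st else (st.1, st.2 ++ [line2])

-- second loop body; state = final_text
def pvStep2 (ft : List String) (line : String) : List String :=
  if pvHdr line then (if ft = [] then ft else ft ++ [""]) ++ [line]
  else if line = "" then ft else ft ++ [line]

def clean_unit_description (text : String) : String :=
  -- text.strip().split('\n'): sep is the nonempty literal '\n', so split? is always some
  let lines := (PySem.Str.split? (PySem.Str.strip text) "\n").getD []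
  let st := lines.foldl pvStep1 ([], [])
  let cleaned := st.1 ++ pvFlush st.2
  PySem.Str.join " " (cleaned.foldl pvStep2 [])

-- ===== PORT B =====
-- single-pass loop body; state = parts
def pvStepB (parts : List String) (raw : String) : List String :=
  let line := PySem.Str.strip raw
  if pvHdr line then (if parts = [] then parts else parts ++ [""]) ++ [line]
  else
    let l2 := PySem.Str.strip (PySem.Str.replace line "|" "")
    if l2 = "" then parts else parts ++ [l2]

def clean_unit_description_alt (text : String) : String :=
  let lines := (PySem.Str.split? (PySem.Str.strip text) "\n").getD []
  PySem.Str.join " " (lines.foldl pvStepB [])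

-- ===== PRECONDITION & SPEC =====
-- Pre_ excludes texts with a non-header line that begins with APARTAMENTO/LOJA/VAGA only after
-- '|' removal: A's second pass re-classifies it as a section header and inserts an extra blank
-- separator, while B treats it as ordinary content; either treatment is defensible there.
def Pre_clean_unit_description (text : String) : Prop :=
  (((PySem.Str.split? (PySem.Str.strip text) "\n").getD []).all fun raw =>
    PySem.Str.strip raw == "" || pvHdr (PySem.Str.strip raw) ||
      !pvHdr (PySem.Str.strip (PySem.Str.replace (PySem.Str.strip raw) "|" ""))) = true
instance (text : String) : Decidable (Pre_clean_unit_description text) := by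
  unfold Pre_clean_unit_description; infer_instance

def pvWitness_clean_unit_description : String := "LOJA 1\nfoo | bar"

def Spec_clean_unit_description (text : String) (out : String) : Prop := out = clean_unit_description_alt text
instance (text : String) (out : String) : Decidable (Spec_clean_unit_description text out) := by unfold Spec_clean_unit_description; infer_instance

-- ===== CLAIM (what is proved, stated in full; the proofs are below) =====
def Claim_equal_clean_unit_description : Prop := ∀ (text : String), Dom_clean_unit_description text → Pre_clean_unit_description text → Spec_clean_unit_description text (clean_unit_description text)

-- ===== LEMMAS AND PROOFS =====

-- the character contents of ' '.join(xs)
def pvJ (xs : List String) : List Char := PySem.Chars.join [' '] (xs.map String.toList)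

def pvP2 (xs : List String) : List String := xs.foldl pvStep2 []

theorem pvJ_append_singleton (xs : List String) (a : String) :
    pvJ (xs ++ [a]) = if xs = [] then a.toList else pvJ xs ++ ' ' :: a.toList := by
  induction xs with
  | nil => simp [pvJ, PySem.Chars.join_singleton]
  | cons x xs ih =>
    cases xs with
    | nil => simp [pvJ, PySem.Chars.join_cons_cons, PySem.Chars.join_singleton]
    | cons y ys =>
      simp only [pvJ, List.map, List.cons_append, PySem.Chars.join_cons_cons] at *
      simpa using ih

theorem pvJ_ne_nil (xs : List String) (hne : xs ≠ []) (h : ∀ s ∈ xs, s.toList ≠ []) :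
    pvJ xs ≠ [] := by
  cases xs with
  | nil => exact absurd rfl hne
  | cons a xs =>
    cases xs with
    | nil =>
      simpa [pvJ, PySem.Chars.join_singleton] using h a (by simp)
    | cons b ys =>
      have ha := h a (by simp)
      simp only [pvJ, List.map, PySem.Chars.join_cons_cons]
      intro hx
      rcases List.append_eq_nil_iff.mp (List.append_eq_nil_iff.mp hx).1 with ⟨h5, _⟩
      exact ha h5

-- a space-free prefix is a prefix of u ++ ' '::v iff of u
theorem prefix_append_space (p u v : List Char) (hp : ' ' ∉ p) :
    (p <+: u ++ ' ' :: v) ↔ (p <+: u) := by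
  induction p generalizing u with
  | nil => simp
  | cons c p ih =>
    cases u with
    | nil =>
      simp only [List.nil_append, List.cons_prefix_cons]
      constructor
      · rintro ⟨h1, _⟩; exact absurd (by simp [h1]) hp
      · intro h; exact absurd (List.prefix_nil.mp h) (by simp)
    | cons x u =>
      simp only [List.cons_append, List.cons_prefix_cons]
      constructor
      · rintro ⟨h1, h2⟩; exact ⟨h1, (ih u (by intro h; exact hp (List.mem_cons_of_mem _ h))).mp h2⟩
      · rintro ⟨h1, h2⟩; exact ⟨h1, (ih u (by intro h; exact hp (List.mem_cons_of_mem _ h))).mpr h2⟩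

theorem pvHdr_ext (a b : String) (v : List Char) (hab : a.toList = b.toList ++ ' ' :: v) :
    pvHdr a = pvHdr b := by
  have key : ∀ p : String, (' ' ∉ p.toList) →
      PySem.Str.startswith a p = PySem.Str.startswith b p := by
    intro p hp
    simp only [PySem.Str.startswith_eq, hab]
    rcases hsw : PySem.Chars.startswith (b.toList ++ ' ' :: v) p.toList with _ | _
    · rcases hsw2 : PySem.Chars.startswith b.toList p.toList with _ | _
      · rfl
      · exfalso
        have h2 := (PySem.Chars.startswith_iff _ _).mp hsw2
        have : p.toList <+: b.toList ++ ' ' :: v := (prefix_append_space _ _ _ hp).mpr h2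
        rw [(PySem.Chars.startswith_iff _ _).mpr this] at hsw; cases hsw
    · have h1 := (PySem.Chars.startswith_iff _ _).mp hsw
      have : p.toList <+: b.toList := (prefix_append_space _ _ _ hp).mp h1
      rw [(PySem.Chars.startswith_iff _ _).mpr this]
  simp only [pvHdr, key "APARTAMENTO" (by decide), key "LOJA" (by decide), key "VAGA" (by decide)]

theorem pvP2_append_singleton (xs : List String) (a : String) :
    pvP2 (xs ++ [a]) = pvStep2 (pvP2 xs) a := by
  simp [pvP2, List.foldl_append]

theorem pvStep2_eq (acc : List String) (x : String) (hx : x ≠ "") :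
    pvStep2 acc x = (if pvHdr x then (if acc = [] then acc else acc ++ [""]) else acc) ++ [x] := by
  simp only [pvStep2, hx]
  split_ifs <;> simp_all

theorem pvJ_last_ext (pref : List String) (a b : String) (v : List Char)
    (h : a.toList = b.toList ++ ' ' :: v) :
    pvJ (pref ++ [a]) = pvJ (pref ++ [b]) ++ ' ' :: v := by
  rw [pvJ_append_singleton, pvJ_append_singleton]
  split_ifs <;> simp [h]

theorem pvJ_blank_last (acc : List String) (x : String) (h : acc ≠ []) :
    pvJ ((acc ++ [""]) ++ [x]) = pvJ acc ++ ' ' :: ' ' :: x.toList := by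
  rw [pvJ_append_singleton, pvJ_append_singleton, if_neg h, if_neg (by simp)]
  simp

-- the invariant-preserving induction over the line list
theorem pv_main (ls : List String) (c cur p : List String)
    (hpre : ∀ raw ∈ ls, (PySem.Str.strip raw == "" || pvHdr (PySem.Str.strip raw) ||
      !pvHdr (PySem.Str.strip (PySem.Str.replace (PySem.Str.strip raw) "|" ""))) = true)
    (h1 : ∀ s ∈ cur, s.toList ≠ [])
    (h1h : cur ≠ [] → pvHdr (PySem.Str.join " " cur) = false)
    (h3 : pvJ (pvP2 (c ++ pvFlush cur)) = pvJ p)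
    (h4 : pvP2 (c ++ pvFlush cur) = [] ↔ p = []) :
    pvJ (pvP2 ((ls.foldl pvStep1 (c, cur)).1 ++ pvFlush (ls.foldl pvStep1 (c, cur)).2))
      = pvJ (ls.foldl pvStepB p) ∧
    (pvP2 ((ls.foldl pvStep1 (c, cur)).1 ++ pvFlush (ls.foldl pvStep1 (c, cur)).2) = []
      ↔ (ls.foldl pvStepB p) = []) := by
  induction ls generalizing c cur p with
  | nil => exact ⟨h3, h4⟩
  | cons raw ls ih =>
    have hpre' : ∀ r ∈ ls, _ := fun r hr => hpre r (List.mem_cons_of_mem _ hr)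
    have hhdr0 : pvHdr "" = false := by decide
    have hflnil : pvFlush ([] : List String) = [] := by simp [pvFlush]
    by_cases hb : PySem.Str.strip raw = ""
    · -- blank line: A flushes the group and appends '', B skips it
      simp only [List.foldl_cons, pvStep1, pvStepB, hb, hhdr0, reduceIte,
        show PySem.Str.strip (PySem.Str.replace "" "|" "") = "" by decide]
      have e : pvP2 ((c ++ pvFlush cur ++ [""]) ++ pvFlush ([] : List String))
          = pvP2 (c ++ pvFlush cur) := by
        rw [hflnil, List.append_nil, List.append_assoc, ← List.append_assoc,
          pvP2_append_singleton]
        simp [pvStep2, hhdr0]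
      exact ih _ _ _ hpre' (by simp) (by simp) (by rw [e]; exact h3) (by rw [e]; exact h4)
    · by_cases hh : pvHdr (PySem.Str.strip raw) = true
      · -- header line
        simp only [List.foldl_cons, pvStep1, pvStepB, hb, hh, reduceIte]
        have e : pvP2 ((c ++ pvFlush cur ++ [PySem.Str.strip raw]) ++ pvFlush ([] : List String))
            = pvStep2 (pvP2 (c ++ pvFlush cur)) (PySem.Str.strip raw) := by
          rw [hflnil, List.append_nil, List.append_assoc, ← List.append_assoc,
            pvP2_append_singleton]
        refine ih _ _ _ hpre' (by simp) (by simp) ?_ ?_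
        · rw [e, pvStep2_eq _ _ hb]
          simp only [hh, reduceIte]
          by_cases hacc : pvP2 (c ++ pvFlush cur) = []
          · have hp : p = [] := h4.mp hacc
            simp [hacc, hp]
          · have hp : p ≠ [] := fun h => hacc (h4.mpr h)
            rw [if_neg hacc, if_neg hp, pvJ_blank_last _ _ hacc, pvJ_blank_last _ _ hp, h3]
        · rw [e, pvStep2_eq _ _ hb]
          simp
      · -- ordinary content line
        simp only [List.foldl_cons, pvStep1, pvStepB, hb, hh, reduceIte]
        by_cases hz : PySem.Str.strip (PySem.Str.replace (PySem.Str.strip raw) "|" "") = ""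
        · simp only [hz, reduceIte]
          exact ih _ _ _ hpre' h1 h1h h3 h4
        · simp only [hz, reduceIte]
          have hl2 : (PySem.Str.strip (PySem.Str.replace (PySem.Str.strip raw) "|" "")).toList ≠ [] :=
            fun h => hz (String.toList_eq_nil_iff.mp h)
          have hl2hdr : pvHdr (PySem.Str.strip (PySem.Str.replace (PySem.Str.strip raw) "|" "")) = false := by
            have hd : PySem.Str.strip raw = "" ∨
                pvHdr (PySem.Str.strip (PySem.Str.replace (PySem.Str.strip raw) "|" "")) = false := by
              simpa [hh] using hpre raw (by simp)
            exact hd.resolve_left hb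
          set l2 := PySem.Str.strip (PySem.Str.replace (PySem.Str.strip raw) "|" "") with hl2def
          have hcur' : ∀ s ∈ cur ++ [l2], s.toList ≠ [] := by
            intro s hs
            rcases List.mem_append.mp hs with hs | hs
            · exact h1 s hs
            · simp at hs; rw [hs]; exact hl2
          by_cases hc : cur = []
          · -- start of a new group
            have hjoin1 : PySem.Str.join " " [l2] = l2 :=
              String.toList_inj.mp (by simp [PySem.Str.toList_join, PySem.Chars.join_singleton])
            have e : pvP2 (c ++ pvFlush (cur ++ [l2])) = pvStep2 (pvP2 c) l2 := by
              rw [show c ++ pvFlush (cur ++ [l2]) = c ++ [l2] by simp [hc, pvFlush, hjoin1],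
                pvP2_append_singleton]
            have hfl : pvP2 (c ++ pvFlush cur) = pvP2 c := by simp [hc, pvFlush]
            rw [hfl] at h3 h4
            refine ih _ _ _ hpre' hcur' (by simpa [hc, hjoin1] using hl2hdr) ?_ ?_
            · rw [e, pvStep2_eq _ _ hz, hl2hdr]
              simp only [Bool.false_eq_true, reduceIte]
              rw [pvJ_append_singleton, pvJ_append_singleton]
              by_cases hacc : pvP2 c = []
              · have hp : p = [] := h4.mp hacc
                simp [hacc, hp]
              · have hp : p ≠ [] := fun h => hacc (h4.mpr h)
                rw [if_neg hacc, if_neg hp, h3]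
            · rw [e, pvStep2_eq _ _ hz]
              simp
          · -- extend the current group
            have hJ' : (PySem.Str.join " " (cur ++ [l2])).toList
                = (PySem.Str.join " " cur).toList ++ ' ' :: l2.toList := by
              simp only [PySem.Str.toList_join]
              have e := pvJ_append_singleton cur l2
              simp only [pvJ] at e
              rw [List.map_append] at e
              simpa [if_neg hc] using e
            have hJne : (PySem.Str.join " " cur).toList ≠ [] := by
              simp only [PySem.Str.toList_join]
              exact pvJ_ne_nil cur hc h1
            have hJs : PySem.Str.join " " cur ≠ "" :=
              fun h => hJne (by rw [h]; rfl)
            have hJ's : PySem.Str.join " " (cur ++ [l2]) ≠ "" := by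
              intro h
              rw [h] at hJ'
              exact hJne (List.append_eq_nil_iff.mp hJ'.symm).1
            have hhdreq : pvHdr (PySem.Str.join " " (cur ++ [l2])) = pvHdr (PySem.Str.join " " cur) :=
              pvHdr_ext _ _ _ hJ'
            have hhdrF : pvHdr (PySem.Str.join " " cur) = false := h1h hc
            have eA : pvP2 (c ++ pvFlush (cur ++ [l2]))
                = pvStep2 (pvP2 c) (PySem.Str.join " " (cur ++ [l2])) := by
              rw [show c ++ pvFlush (cur ++ [l2]) = c ++ [PySem.Str.join " " (cur ++ [l2])] by
                simp [pvFlush], pvP2_append_singleton]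
            have eO : pvP2 (c ++ pvFlush cur) = pvStep2 (pvP2 c) (PySem.Str.join " " cur) := by
              rw [show c ++ pvFlush cur = c ++ [PySem.Str.join " " cur] by simp [pvFlush, hc],
                pvP2_append_singleton]
            rw [eO] at h3 h4
            have hne : pvStep2 (pvP2 c) (PySem.Str.join " " cur) ≠ [] := by
              rw [pvStep2_eq _ _ hJs]; simp
            have hp : p ≠ [] := fun h => hne (h4.mpr h)
            rw [pvStep2_eq _ _ hJs, hhdrF] at h3
            simp only [Bool.false_eq_true, reduceIte] at h3
            refine ih _ _ _ hpre' hcur' (fun _ => by rw [hhdreq]; exact hhdrF) ?_ ?_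
            · rw [eA, pvStep2_eq _ _ hJ's, hhdreq, hhdrF]
              simp only [Bool.false_eq_true, reduceIte]
              rw [pvJ_last_ext _ _ (PySem.Str.join " " cur) _ hJ', h3,
                pvJ_append_singleton, if_neg hp]
            · rw [eA, pvStep2_eq _ _ hJ's]
              simp [hp]

-- ===== VERDICT (by name: the statement is the Claim_ definition above) =====
theorem clean_unit_description_spec : Claim_equal_clean_unit_description := by
  intro text _ hpre
  unfold Spec_clean_unit_description clean_unit_description clean_unit_description_alt
  unfold Pre_clean_unit_description at hpre
  rw [List.all_eq_true] at hpre
  have h := pv_main ((PySem.Str.split? (PySem.Str.strip text) "\n").getD []) [] [] []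
    (fun r hr => hpre r hr)
    (by simp) (by simp) (by simp [pvFlush, pvP2]) (by simp [pvFlush, pvP2])
  apply String.toList_inj.mp
  simpa [PySem.Str.toList_join, pvJ, pvP2] using h.1
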